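-- pv_equiv track=rewrite | github.com/acutesoftware/worldbuild | worldbuild/game_wiki/build_game_wiki.py | get_tool_actions
-- ===== SOURCE A (Python) =====
-- def get_tool_actions(lstToolTypes, lstObjActions, item_id):
--     """
--     gets a list of tool actions for the tools page (filtered item list)
--     """
--     txt = ''
--     tool_type = 'None'
--     for tpe in sorted(lstToolTypes):
--         if tpe[4] in item_id:
--             tool_type = tpe[1]
--     for lst in lstObjActions:
--         if lst[2] == tool_type:
--             txt += 'when used on "' + lst[1] + '", it calls ' +lst[3] + '<BR>'
--
--     return txt
-- ===== SOURCE B (Python) =====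
-- def get_tool_actions(lstToolTypes, lstObjActions, item_id):
--     """
--     gets a list of tool actions for the tools page (filtered item list)
--     """
--     matches = [tpe for tpe in lstToolTypes if tpe[4] in item_id]
--     tool_type = max(matches)[1] if matches else 'None'
--     return ''.join('when used on "' + lst[1] + '", it calls ' + lst[3] + '<BR>'
--                    for lst in lstObjActions if lst[2] == tool_type)
-- ===== Notes on version B (the rewrite author's own statement) =====
-- stated objective: alternative
-- what changed: B drops A's full sort of lstToolTypes: it filters the tool types whose 5th field is a substring of item_id and takes the maximum matching tuple in one pass (max(matches)[1], identical to 'last match in sorted order wins'), and builds the action text with a join over a filtered comprehension instead of string accumulation.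
import Mathlib
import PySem

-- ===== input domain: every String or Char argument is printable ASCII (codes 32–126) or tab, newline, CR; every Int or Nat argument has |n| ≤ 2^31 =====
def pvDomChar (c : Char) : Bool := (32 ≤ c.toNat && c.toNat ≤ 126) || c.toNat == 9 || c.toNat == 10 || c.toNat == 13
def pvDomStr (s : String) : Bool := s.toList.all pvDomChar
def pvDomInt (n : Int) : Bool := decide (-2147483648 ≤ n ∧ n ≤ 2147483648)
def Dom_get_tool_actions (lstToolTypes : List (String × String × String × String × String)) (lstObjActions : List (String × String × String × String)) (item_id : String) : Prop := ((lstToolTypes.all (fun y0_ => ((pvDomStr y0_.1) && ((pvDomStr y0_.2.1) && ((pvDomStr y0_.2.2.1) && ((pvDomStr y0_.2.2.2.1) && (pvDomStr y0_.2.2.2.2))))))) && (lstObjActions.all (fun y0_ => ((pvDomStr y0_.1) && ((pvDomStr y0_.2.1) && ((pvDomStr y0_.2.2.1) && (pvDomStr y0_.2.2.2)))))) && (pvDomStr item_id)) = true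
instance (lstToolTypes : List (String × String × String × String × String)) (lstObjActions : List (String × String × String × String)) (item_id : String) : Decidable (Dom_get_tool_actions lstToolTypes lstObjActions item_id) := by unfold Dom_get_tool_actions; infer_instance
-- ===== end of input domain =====

-- B replaces A's sort-then-scan selection of the tool type by a single max pass over the
-- matching tool types, and accumulates the action text by a join (objective: alternative).

-- Python compares 5-tuples of strings lexicographically; key5 is the order-embedding of the
-- 5-tuple into Mathlib's lexicographic product, so 'key5 a < key5 b' is exactly Python's 'a < b'.
abbrev PyTool := String × String × String × String × String
abbrev PyKey5 : Type := Lex (String × Lex (String × Lex (String × Lex (String × String))))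
def key5 (t : PyTool) : PyKey5 :=
  toLex (t.1, toLex (t.2.1, toLex (t.2.2.1, toLex (t.2.2.2.1, t.2.2.2.2))))

-- ===== PORT A =====
def get_tool_actions (lstToolTypes : List (String × String × String × String × String)) (lstObjActions : List (String × String × String × String)) (item_id : String) : String :=
  -- txt = ''; tool_type = 'None'; for tpe in sorted(lstToolTypes): …
  -- sorted(lstToolTypes) is PySem's stable sort under Python's tuple order, i.e. under key5 (exact).
  let tool_type := (PySem.List.sorted lstToolTypes key5 false).foldl
      (fun tt tpe => if PySem.Str.isIn tpe.2.2.2.2 item_id then tpe.2.1 else tt) "None"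
  -- for lst in lstObjActions: if lst[2] == tool_type: txt += …
  lstObjActions.foldl
      (fun txt lst => if lst.2.2.1 == tool_type then
          txt ++ "when used on \"" ++ lst.2.1 ++ "\", it calls " ++ lst.2.2.2 ++ "<BR>"
        else txt) ""

-- ===== PORT B =====
def get_tool_actions_alt (lstToolTypes : List (String × String × String × String × String)) (lstObjActions : List (String × String × String × String)) (item_id : String) : String :=
  -- matched = [tpe for tpe in lstToolTypes if tpe[4] in item_id]
  let matched := lstToolTypes.filter (fun tpe => PySem.Str.isIn tpe.2.2.2.2 item_id)
  -- tool_type = max(matched)[1] if matched else 'None'   (max under Python's tuple order = key5)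
  let tool_type := match PySem.List.max? matched key5 with
    | some m => m.2.1
    | none => "None"
  -- ''.join(… for lst in lstObjActions if lst[2] == tool_type)
  PySem.Str.join "" ((lstObjActions.filter (fun lst => lst.2.2.1 == tool_type)).map
    (fun lst => "when used on \"" ++ lst.2.1 ++ "\", it calls " ++ lst.2.2.2 ++ "<BR>"))

-- ===== PRECONDITION & SPEC =====
def Spec_get_tool_actions (lstToolTypes : List (String × String × String × String × String)) (lstObjActions : List (String × String × String × String)) (item_id : String) (out : String) : Prop := out = get_tool_actions_alt lstToolTypes lstObjActions item_id
instance (lstToolTypes : List (String × String × String × String × String)) (lstObjActions : List (String × String × String × String)) (item_id : String) (out : String) : Decidable (Spec_get_tool_actions lstToolTypes lstObjActions item_id out) := by unfold Spec_get_tool_actions; infer_instance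

-- ===== CLAIM (what is proved, stated in full; the proofs are below) =====
def Claim_equal_get_tool_actions : Prop := ∀ (lstToolTypes : List (String × String × String × String × String)) (lstObjActions : List (String × String × String × String)) (item_id : String), Dom_get_tool_actions lstToolTypes lstObjActions item_id → Spec_get_tool_actions lstToolTypes lstObjActions item_id (get_tool_actions lstToolTypes lstObjActions item_id)

-- ===== LEMMAS AND PROOFS =====

theorem key5_injective : Function.Injective key5 := by
  intro a b h
  unfold key5 at h
  simp only [toLex_inj, Prod.mk.injEq] at h
  obtain ⟨h1, h2, h3, h4, h5⟩ := h
  exact Prod.ext h1 (Prod.ext h2 (Prod.ext h3 (Prod.ext h4 h5)))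

theorem getLast?_cons_of_ne {α : Type} (x : α) (ys : List α) (h : ys ≠ []) :
    (x :: ys).getLast? = ys.getLast? := by
  cases ys with
  | nil => exact absurd rfl h
  | cons z t => exact List.getLast?_cons_cons

-- a 'last match wins' fold is the last element of the filtered list
theorem foldl_last_match {α : Type} (p : α → Bool) (f : α → String) :
    ∀ (l : List α) (init : String),
      l.foldl (fun tt x => if p x then f x else tt) init
        = match (l.filter p).getLast? with
          | none => init
          | some m => f m := by
  intro l
  induction l with
  | nil => intro init; rfl
  | cons x l ih =>
    intro init
    by_cases hx : p x = true
    · rw [List.foldl_cons, if_pos hx, ih (f x), List.filter_cons_of_pos hx]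
      cases hlast : (l.filter p).getLast? with
      | none =>
        have h0 : l.filter p = [] := List.getLast?_eq_none_iff.mp hlast
        rw [h0]
        simp
      | some m =>
        have hne : l.filter p ≠ [] := by
          intro h; rw [h] at hlast; simp at hlast
        rw [getLast?_cons_of_ne x _ hne, hlast]
    · rw [List.foldl_cons, if_neg hx, List.filter_cons_of_neg hx]
      exact ih init

-- the last element of a key-nondecreasing list is key-maximal in it
theorem getLast?_is_max (L : List PyTool) (m : PyTool)
    (hp : L.Pairwise (fun a b => key5 a ≤ key5 b)) (hl : L.getLast? = some m) :
    ∀ y ∈ L, key5 y ≤ key5 m := by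
  induction L with
  | nil => simp at hl
  | cons x L ih =>
    by_cases hL : L = []
    · subst hL
      simp at hl; subst hl
      intro y hy; simp at hy; subst hy; exact le_refl _
    · rw [getLast?_cons_of_ne x L hL] at hl
      rw [List.pairwise_cons] at hp
      intro y hy
      rcases List.mem_cons.mp hy with h | h
      · subst h
        exact hp.1 m (List.mem_of_getLast? hl)
      · exact ih hp.2 hl y h

theorem intercalate_nil_eq_flatten : ∀ (L : List (List Char)),
    List.intercalate ([] : List Char) L = L.flatten := by
  intro L
  induction L with
  | nil => rfl
  | cons x L ih =>
    cases L with
    | nil => simp [List.intercalate]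
    | cons z t =>
      simp only [List.intercalate, List.intersperse] at *
      simp_all

theorem str_join_nil : PySem.Str.join "" ([] : List String) = "" := rfl

theorem str_join_cons (s : String) (ss : List String) :
    PySem.Str.join "" (s :: ss) = s ++ PySem.Str.join "" ss := by
  apply String.toList_inj.mp
  simp [PySem.Str.join, PySem.Chars.join, intercalate_nil_eq_flatten]

-- the accumulate-if loop over strings is the join of the mapped filter
theorem loop2_eq_join (q : (String × String × String × String) → Bool) :
    ∀ (l : List (String × String × String × String)) (acc : String),
      l.foldl (fun txt lst => if q lst then
          txt ++ "when used on \"" ++ lst.2.1 ++ "\", it calls " ++ lst.2.2.2 ++ "<BR>"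
        else txt) acc
        = acc ++ PySem.Str.join "" ((l.filter q).map
            (fun lst => "when used on \"" ++ lst.2.1 ++ "\", it calls " ++ lst.2.2.2 ++ "<BR>")) := by
  intro l
  induction l with
  | nil =>
    intro acc
    rw [List.foldl_nil, List.filter_nil, List.map_nil, str_join_nil, String.append_empty]
  | cons x l ih =>
    intro acc
    by_cases hx : q x = true
    · rw [List.foldl_cons, if_pos hx, ih _, List.filter_cons_of_pos hx,
        List.map_cons, str_join_cons]
      simp [String.append_assoc]
    · rw [List.foldl_cons, if_neg hx, List.filter_cons_of_neg hx]
      exact ih acc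

-- the two tool-type selections agree
theorem tool_type_eq (lstToolTypes : List PyTool) (item_id : String) :
    ((PySem.List.sorted lstToolTypes key5 false).foldl
        (fun tt tpe => if PySem.Str.isIn tpe.2.2.2.2 item_id then tpe.2.1 else tt) "None")
      = (match PySem.List.max? (lstToolTypes.filter
            (fun tpe => PySem.Str.isIn tpe.2.2.2.2 item_id)) key5 with
          | some m => m.2.1
          | none => "None") := by
  set p : PyTool → Bool := fun tpe => PySem.Str.isIn tpe.2.2.2.2 item_id with hp
  rw [foldl_last_match p (fun tpe => tpe.2.1)]
  have hperm : ((PySem.List.sorted lstToolTypes key5 false).filter p).Perm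
      (lstToolTypes.filter p) :=
    (PySem.List.sorted_perm lstToolTypes key5 false).filter p
  cases hlast : ((PySem.List.sorted lstToolTypes key5 false).filter p).getLast? with
  | none =>
    have h1 : (PySem.List.sorted lstToolTypes key5 false).filter p = [] :=
      List.getLast?_eq_none_iff.mp hlast
    have h2 : lstToolTypes.filter p = [] := by
      rw [h1] at hperm; exact hperm.symm.eq_nil
    rw [(PySem.List.max?_eq_none_iff _ _).mpr h2]
  | some m =>
    have hm : m ∈ (PySem.List.sorted lstToolTypes key5 false).filter p :=
      List.mem_of_getLast? hlast
    have hmf : m ∈ lstToolTypes.filter p := hperm.mem_iff.mp hm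
    cases hmax : PySem.List.max? (lstToolTypes.filter p) key5 with
    | none =>
      have h0 := (PySem.List.max?_eq_none_iff _ _).mp hmax
      rw [h0] at hmf; simp at hmf
    | some m' =>
      have hpair : ((PySem.List.sorted lstToolTypes key5 false).filter p).Pairwise
          (fun a b => key5 a ≤ key5 b) :=
        (PySem.List.sorted_pairwise lstToolTypes key5).filter p
      have hmax1 : key5 m ≤ key5 m' := PySem.List.max?_isMax hmax m hmf
      have hm' : m' ∈ (PySem.List.sorted lstToolTypes key5 false).filter p :=
        hperm.mem_iff.mpr (PySem.List.max?_mem hmax)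
      have hmax2 : key5 m' ≤ key5 m := getLast?_is_max _ m hpair hlast m' hm'
      have hmm : m = m' := key5_injective (le_antisymm hmax1 hmax2)
      rw [hmm]

-- ===== VERDICT (by name: the statement is the Claim_ definition above) =====
theorem get_tool_actions_spec : Claim_equal_get_tool_actions := by
  intro lstToolTypes lstObjActions item_id _
  unfold Spec_get_tool_actions
  simp only [get_tool_actions, get_tool_actions_alt]
  rw [tool_type_eq lstToolTypes item_id]
  rw [loop2_eq_join]
  rw [String.empty_append]
  rfl
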